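-- pv_equiv track=rewrite | github.com/leetdavid/facebook-message-analytics | message_analysis.py | get_message_counts
-- ===== SOURCE A (Python) =====
-- def get_message_counts(data, data_owner):
-- 	if 'messages' in data and 'title' in data and 'participants' in data:
-- 		you_count = other_count = 0
--
-- 		for message in data['messages']:
-- 			if 'sender_name' in message and message['sender_name'] == data_owner:
-- 				you_count+=1
-- 			else:
-- 				other_count+=1
-- 		return you_count, other_count
-- ===== SOURCE B (Python) =====
-- def get_message_counts(data, data_owner):
--     if 'messages' in data and 'title' in data and 'participants' in data:
--         tally = {}
--         for m in data['messages']: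
--             k = m.get('sender_name')
--             tally[k] = tally.get(k, 0) + 1
--         you_count = tally.get(data_owner, 0)
--         other_count = sum(v for k, v in tally.items() if k != data_owner)
--         return you_count, other_count
-- ===== Notes on version B (the rewrite author's own statement) =====
-- stated objective: alternative
-- what changed: B first groups messages into a tally dict keyed by sender name (Counter-style), then reads the owner's count by a dict lookup and computes the other count by summing the remaining buckets, instead of incrementing two counters across an if/else in one scan.
import Mathlib
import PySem

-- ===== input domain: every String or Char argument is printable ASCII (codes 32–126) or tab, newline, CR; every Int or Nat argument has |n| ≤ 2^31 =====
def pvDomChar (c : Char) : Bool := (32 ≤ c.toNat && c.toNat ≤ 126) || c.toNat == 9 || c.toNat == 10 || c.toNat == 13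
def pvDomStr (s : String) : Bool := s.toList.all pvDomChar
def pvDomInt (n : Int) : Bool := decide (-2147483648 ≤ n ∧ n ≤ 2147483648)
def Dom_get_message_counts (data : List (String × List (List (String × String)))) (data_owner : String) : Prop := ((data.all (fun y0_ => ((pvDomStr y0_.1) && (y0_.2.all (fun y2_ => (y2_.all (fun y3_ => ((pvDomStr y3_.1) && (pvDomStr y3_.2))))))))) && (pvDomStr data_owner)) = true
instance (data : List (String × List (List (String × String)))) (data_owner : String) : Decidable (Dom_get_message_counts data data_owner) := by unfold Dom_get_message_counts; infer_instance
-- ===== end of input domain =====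

-- B groups the messages into a tally dict keyed by sender name, then reads the owner's
-- count by lookup and sums the other buckets (objective: alternative decomposition).

-- ===== PORT A =====
-- dict lookup on an association list (first match), shared dict primitive
def pvLookup {a : Type} (d : List (String × a)) (k : String) : Option a :=
  (d.find? (fun p => p.1 == k)).map (·.2)

def get_message_counts (data : List (String × List (List (String × String)))) (data_owner : String) : Option (Int × Int) :=
  if (pvLookup data "messages").isSome ∧ (pvLookup data "title").isSome ∧ (pvLookup data "participants").isSome then
    let msgs := (pvLookup data "messages").getD []
    some (msgs.foldl (fun (acc : Int × Int) m =>
      match pvLookup m "sender_name" with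
      | some s => if s = data_owner then (acc.1 + 1, acc.2) else (acc.1, acc.2 + 1)
      | none => (acc.1, acc.2 + 1)) (0, 0))
  else none

-- ===== PORT B =====
-- m.get('sender_name')
def pvKeyOf (m : List (String × String)) : Option String := pvLookup m "sender_name"

def get_message_counts_alt (data : List (String × List (List (String × String)))) (data_owner : String) : Option (Int × Int) :=
  if (pvLookup data "messages").isSome ∧ (pvLookup data "title").isSome ∧ (pvLookup data "participants").isSome then
    let msgs := (pvLookup data "messages").getD []
    let tally := msgs.foldl (fun (d : PySem.Dict (Option String) Int) m =>
      let k := pvKeyOf m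
      d.insert k (d.getD k 0 + 1)) PySem.Dict.empty
    let you_count := tally.getD (some data_owner) 0
    let other_count := ((tally.items.filter (fun p => p.1 != some data_owner)).map (·.2)).sum
    some (you_count, other_count)
  else none

-- ===== PRECONDITION & SPEC =====
def Spec_get_message_counts (data : List (String × List (List (String × String)))) (data_owner : String) (out : Option (Int × Int)) : Prop := out = get_message_counts_alt data data_owner
instance (data : List (String × List (List (String × String)))) (data_owner : String) (out : Option (Int × Int)) : Decidable (Spec_get_message_counts data data_owner out) := by unfold Spec_get_message_counts; infer_instance

-- ===== CLAIM (what is proved, stated in full; the proofs are below) =====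
def Claim_equal_get_message_counts : Prop := ∀ (data : List (String × List (List (String × String)))) (data_owner : String), Dom_get_message_counts data data_owner → Spec_get_message_counts data data_owner (get_message_counts data data_owner)

-- ===== LEMMAS AND PROOFS =====

-- A's two-counter fold, in closed form over countP of its owner test
theorem pv_fold_eq (data_owner : String) (msgs : List (List (String × String))) :
    ∀ y o : Int,
    msgs.foldl (fun (acc : Int × Int) m =>
      match pvLookup m "sender_name" with
      | some s => if s = data_owner then (acc.1 + 1, acc.2) else (acc.1, acc.2 + 1)
      | none => (acc.1, acc.2 + 1)) (y, o)
    = (y + (msgs.countP (fun m => pvKeyOf m == some data_owner) : Int),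
       o + ((msgs.length : Int) - (msgs.countP (fun m => pvKeyOf m == some data_owner) : Int))) := by
  induction msgs with
  | nil => intro y o; simp
  | cons m t ih =>
    intro y o
    simp only [List.foldl_cons, List.countP_cons, List.length_cons]
    have hk : pvLookup m "sender_name" = pvKeyOf m := rfl
    rw [hk]
    cases hm : pvKeyOf m with
    | none =>
      rw [ih]
      simp only [Prod.mk.injEq,
        show ((none : Option String) == some data_owner) = false from rfl,
        Bool.false_eq_true, if_false]
      push_cast
      constructor <;> omega
    | some s =>
      by_cases hs : s = data_owner
      · subst hs
        simp only [beq_self_eq_true, if_true]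
        rw [ih]
        simp only [Prod.mk.injEq]
        push_cast
        constructor <;> omega
      · have hb : ((some s : Option String) == some data_owner) = false := by simp [hs]
        simp only [hb, Bool.false_eq_true, if_false, if_neg hs]
        rw [ih]
        simp only [Prod.mk.injEq]
        push_cast
        constructor <;> omega

-- counting matches of two mutually exclusive tests splits
theorem pv_countP_or {a : Type} (l : List a) (p q : a -> Bool)
    (h : forall x, x ∈ l -> ¬(p x = true ∧ q x = true)) :
    l.countP (fun x => p x || q x) = l.countP p + l.countP q := by
  induction l with
  | nil => simp
  | cons c t ih =>
    simp only [List.countP_cons]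
    rw [ih (fun x hx => h x (List.mem_cons_of_mem c hx))]
    have hc := h c (List.mem_cons_self)
    cases hp : p c <;> cases hq : q c <;> simp_all <;> omega

-- summing ks.count over a duplicate-free list of keys counts membership
theorem pv_sum_counts (ks : List (Option String)) :
    ∀ (S : List (Option String)), S.Nodup →
    (S.map (fun k => ks.count k)).sum = ks.countP (fun x => decide (x ∈ S)) := by
  intro S
  induction S with
  | nil => intro _; simp
  | cons c t ih =>
    intro hnd
    have hct : c ∉ t := (List.nodup_cons.mp hnd).1
    simp only [List.map_cons, List.sum_cons]
    rw [ih (List.nodup_cons.mp hnd).2]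
    have h1 : ks.countP (fun x => decide (x ∈ c :: t))
        = ks.countP (fun x => (x == c) || decide (x ∈ t)) := by
      apply List.countP_congr; intro x _; simp [List.mem_cons]
    rw [h1, pv_countP_or]
    · have : ks.count c = ks.countP (fun x => x == c) := rfl
      omega
    · intro x _ ⟨hp, hq⟩
      exact hct (by simpa using (eq_of_beq hp ▸ (by simpa using hq)))

-- summing the non-owner buckets of the tally counts the non-owner messages
theorem pv_sum_other (ks : List (Option String)) (K : Option String) :
    ((((PySem.Set.ofList ks).filter (fun x => x != K)).map (fun k => ((ks.count k : Int)))).sum)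
      = (ks.countP (fun x => x != K) : Int) := by
  have hnd : ((PySem.Set.ofList ks).filter (fun x => x != K)).Nodup :=
    List.Nodup.filter _ (PySem.Set.nodup_ofList ks)
  have h1 := pv_sum_counts ks _ hnd
  have h2 : ks.countP (fun x => decide (x ∈ (PySem.Set.ofList ks).filter (fun x => x != K)))
      = ks.countP (fun x => x != K) := by
    apply List.countP_congr; intro x hx
    simp [List.mem_filter, PySem.Set.mem_ofList, hx]
  calc (((PySem.Set.ofList ks).filter (fun x => x != K)).map (fun k => ((ks.count k : Int)))).sum
      = ((((PySem.Set.ofList ks).filter (fun x => x != K)).map (fun k => ks.count k)).sum : Int) := by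
        rw [Nat.cast_list_sum, List.map_map]; rfl
    _ = (ks.countP (fun x => x != K) : Int) := by rw [h1, h2]

-- ===== VERDICT (by name: the statement is the Claim_ definition above) =====
theorem get_message_counts_spec : Claim_equal_get_message_counts := by
  intro data data_owner _
  unfold Spec_get_message_counts get_message_counts get_message_counts_alt
  split_ifs with h
  · simp only
    rw [pv_fold_eq]
    -- rewrite B's tally loop as a counter over the list of sender keys
    set msgs := (pvLookup data "messages").getD [] with hmsgs
    have htally : msgs.foldl (fun (d : PySem.Dict (Option String) Int) m =>
        let k := pvKeyOf m
        d.insert k (d.getD k 0 + 1)) PySem.Dict.empty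
        = PySem.Dict.counter (msgs.map pvKeyOf) := by
      rw [← PySem.Dict.foldl_insert_getD_add_one_eq_counter, List.foldl_map]
    rw [htally]
    set ks := msgs.map pvKeyOf with hks
    have hyou : (PySem.Dict.counter ks).getD (some data_owner) 0 = (ks.count (some data_owner) : Int) :=
      PySem.Dict.getD_counter ks (some data_owner)
    have hitems := PySem.Dict.items_counter ks
    rw [hyou, hitems, List.filter_map, List.map_map]
    have hother := pv_sum_other ks (some data_owner)
    have hcomp : ((fun p : Option String × Int => p.1 != some data_owner) ∘
        (fun k => (k, (ks.count k : Int)))) = (fun x => x != some data_owner) := rfl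
    rw [hcomp]
    have hmap : ((fun p : Option String × Int => p.2) ∘ (fun k => (k, (ks.count k : Int))))
        = (fun k => (ks.count k : Int)) := rfl
    rw [hmap, hother]
    -- arithmetic: countP owner + countP non-owner = length
    have hsplit : ks.countP (fun x => x == some data_owner)
        + ks.countP (fun x => x != some data_owner) = ks.length := by
      rw [← pv_countP_or ks (fun x => x == some data_owner) (fun x => x != some data_owner)
        (by intro x _ hc; simp [bne, hc.1] at hc)]
      have hall : ∀ x ∈ ks, ((x == some data_owner) || (x != some data_owner)) = true := by
        intro x _; cases hx : x == some data_owner <;> simp [bne, hx]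
      have he : ks.countP (fun x => (x == some data_owner) || (x != some data_owner))
          = ks.countP (fun _ => true) := by
        apply List.countP_congr; intro x hx; simp [hall x hx]
      rw [he, List.countP_true]
    have hcnt : ks.count (some data_owner) = ks.countP (fun x => x == some data_owner) := rfl
    have hcm : ks.countP (fun x => x == some data_owner)
        = msgs.countP (fun m => pvKeyOf m == some data_owner) := by
      rw [hks, List.countP_map]; rfl
    have hlm : ks.length = msgs.length := by rw [hks, List.length_map]
    simp only [Option.some.injEq, Prod.mk.injEq]
    constructor
    · rw [hcnt, hcm]; ring
    · omega
  · rfl
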